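-- pv_equiv track=rewrite | github.com/pypi-data/pypi-mirror-303 | packages/biosutilities/biosutilities-24.10.23-py3-none-any.whl/biosutilities/common/compression.py | szip_switches
-- ===== SOURCE A (Python) =====
-- from typing import Final
--
-- SZIP_COMMON: Final[list[str]] = ['-aou', '-p', '-y', '-spd', '-spe', '-sccUTF-8',
--                                  '-bso0', '-bse0', '-bsp0', '-ba', '-bd', '-bb0']
--
-- def szip_switches(in_switches: list[str]) -> list[str]:
--     """ Generate 7-Zip command line switches """
--
--     common_switches: list[str] = SZIP_COMMON
--
--     for in_switch in in_switches:
--         for sw_pattern in ('-p', '-ao', '-bs', '-bb', '-scc'):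
--             if in_switch.startswith(sw_pattern):
--                 common_switches = [sw for sw in common_switches if not sw.startswith(sw_pattern)]
--
--                 break
--
--     return [*set(common_switches + in_switches), '--']
-- ===== SOURCE B (Python) =====
-- SZIP_COMMON = ['-aou', '-p', '-y', '-spd', '-spe', '-sccUTF-8',
--                '-bso0', '-bse0', '-bsp0', '-ba', '-bd', '-bb0']
--
-- def szip_switches(in_switches: list[str]) -> list[str]:
--     """ Generate 7-Zip command line switches """
--     strip = [p for p in ('-p', '-ao', '-bs', '-bb', '-scc')
--              if any(sw.startswith(p) for sw in in_switches)]
--     filtered = [sw for sw in SZIP_COMMON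
--                 if not any(sw.startswith(p) for p in strip)]
--     return [*set(filtered + in_switches), '--']
-- ===== Notes on version B (the rewrite author's own statement) =====
-- stated objective: simpler
-- what changed: Replaces A's interleaved per-input rebuild-and-break loop over the common list with a two-stage decomposition: first collect the set of trigger prefixes present in the input, then filter SZIP_COMMON once; valid because the five prefixes are mutually exclusive.
import Mathlib
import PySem

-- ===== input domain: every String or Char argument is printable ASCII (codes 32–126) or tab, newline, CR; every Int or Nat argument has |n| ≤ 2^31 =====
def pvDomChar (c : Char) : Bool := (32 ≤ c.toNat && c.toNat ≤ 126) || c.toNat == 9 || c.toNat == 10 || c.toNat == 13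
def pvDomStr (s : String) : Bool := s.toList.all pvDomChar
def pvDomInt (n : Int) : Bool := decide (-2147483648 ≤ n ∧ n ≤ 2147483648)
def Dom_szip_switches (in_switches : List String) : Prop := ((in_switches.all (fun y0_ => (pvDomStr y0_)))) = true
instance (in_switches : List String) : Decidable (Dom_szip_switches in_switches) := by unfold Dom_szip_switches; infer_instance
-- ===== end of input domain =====

-- B replaces A's interleaved per-input rebuild-and-break loop with a two-stage
-- "collect trigger prefixes, then filter the common list once" decomposition (objective: simpler).


-- ===== PORT A =====
def pvSzipCommon : List String :=
  ["-aou", "-p", "-y", "-spd", "-spe", "-sccUTF-8",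
   "-bso0", "-bse0", "-bsp0", "-ba", "-bd", "-bb0"]

def pvSzipPatterns : List String := ["-p", "-ao", "-bs", "-bb", "-scc"]

-- A's inner 'for sw_pattern in (…): if in_switch.startswith(…): … ; break'
def pvSzipInner (common : List String) (in_switch : String) : List String → List String
  | [] => common
  | p :: ps =>
    if PySem.Str.startswith in_switch p then
      common.filter (fun sw => !(PySem.Str.startswith sw p))
    else
      pvSzipInner common in_switch ps

def szip_switches (in_switches : List String) : List String :=
  let common : List String :=
    in_switches.foldl (fun c in_switch => pvSzipInner c in_switch pvSzipPatterns) pvSzipCommon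
  PySem.Set.ofList (common ++ in_switches) ++ ["--"]

-- ===== PORT B =====
def szip_switches_alt (in_switches : List String) : List String :=
  let strip : List String :=
    pvSzipPatterns.filter (fun p => in_switches.any (fun sw => PySem.Str.startswith sw p))
  let filtered : List String :=
    pvSzipCommon.filter (fun sw => !(strip.any (fun p => PySem.Str.startswith sw p)))
  PySem.Set.ofList (filtered ++ in_switches) ++ ["--"]

-- ===== PRECONDITION & SPEC =====
def Spec_szip_switches (in_switches : List String) (out : List String) : Prop := out = szip_switches_alt in_switches
instance (in_switches : List String) (out : List String) : Decidable (Spec_szip_switches in_switches out) := by unfold Spec_szip_switches; infer_instance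

-- ===== CLAIM (what is proved, stated in full; the proofs are below) =====
def Claim_equal_szip_switches : Prop := ∀ (in_switches : List String), Dom_szip_switches in_switches → Spec_szip_switches in_switches (szip_switches in_switches)

-- ===== LEMMAS AND PROOFS =====

-- the predicate "some pattern is triggered by a switch of l and sw starts with it"
def pvPredAny (l : List String) (sw : String) : Bool :=
  pvSzipPatterns.any (fun p => l.any (fun j => PySem.Str.startswith j p) && PySem.Str.startswith sw p)

-- the five trigger patterns are mutually exclusive prefixes
lemma pvPats_disjoint (i p q : String) (hp : p ∈ pvSzipPatterns) (hq : q ∈ pvSzipPatterns)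
    (hpq : p ≠ q) (h1 : PySem.Str.startswith i p = true) :
    PySem.Str.startswith i q = false := by
  cases hb : PySem.Str.startswith i q with
  | false => rfl
  | true =>
    exfalso
    simp only [pvSzipPatterns, List.mem_cons, List.not_mem_nil, or_false] at hp hq
    rw [PySem.Str.startswith_eq, PySem.Chars.startswith_iff] at h1 hb
    rcases List.prefix_or_prefix_of_prefix h1 hb with h | h <;>
      rcases hp with rfl | rfl | rfl | rfl | rfl <;>
        rcases hq with rfl | rfl | rfl | rfl | rfl <;>
          first
            | exact hpq rfl
            | exact absurd h (by decide)

lemma pvStep_eq (i : String) (l c : List String) :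
    (pvSzipInner c i pvSzipPatterns).filter (fun sw => !(pvPredAny l sw))
      = c.filter (fun sw => !(pvPredAny (i :: l) sw)) := by
  simp only [pvSzipInner, pvSzipPatterns]
  split_ifs with h1 h2 h3 h4 h5
  ·
    have e2 : PySem.Str.startswith i "-ao" = false :=
      pvPats_disjoint i "-p" "-ao" (by decide) (by decide) (by decide) h1
    have e3 : PySem.Str.startswith i "-bs" = false :=
      pvPats_disjoint i "-p" "-bs" (by decide) (by decide) (by decide) h1
    have e4 : PySem.Str.startswith i "-bb" = false :=
      pvPats_disjoint i "-p" "-bb" (by decide) (by decide) (by decide) h1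
    have e5 : PySem.Str.startswith i "-scc" = false :=
      pvPats_disjoint i "-p" "-scc" (by decide) (by decide) (by decide) h1
    rw [List.filter_filter]
    apply List.filter_congr
    intro sw _
    simp at h1 e2 e3 e4 e5
    simp [pvPredAny, pvSzipPatterns, h1, e2, e3, e4, e5]
    cases PySem.Chars.startswith sw.toList ['-', 'p'] <;> simp
  ·
    have e3 : PySem.Str.startswith i "-bs" = false :=
      pvPats_disjoint i "-ao" "-bs" (by decide) (by decide) (by decide) h2
    have e4 : PySem.Str.startswith i "-bb" = false :=
      pvPats_disjoint i "-ao" "-bb" (by decide) (by decide) (by decide) h2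
    have e5 : PySem.Str.startswith i "-scc" = false :=
      pvPats_disjoint i "-ao" "-scc" (by decide) (by decide) (by decide) h2
    rw [List.filter_filter]
    apply List.filter_congr
    intro sw _
    simp at h1 h2 e3 e4 e5
    simp [pvPredAny, pvSzipPatterns, h1, h2, e3, e4, e5]
    cases PySem.Chars.startswith sw.toList ['-', 'a', 'o'] <;> simp
  ·
    have e4 : PySem.Str.startswith i "-bb" = false :=
      pvPats_disjoint i "-bs" "-bb" (by decide) (by decide) (by decide) h3
    have e5 : PySem.Str.startswith i "-scc" = false :=
      pvPats_disjoint i "-bs" "-scc" (by decide) (by decide) (by decide) h3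
    rw [List.filter_filter]
    apply List.filter_congr
    intro sw _
    simp at h1 h2 h3 e4 e5
    simp [pvPredAny, pvSzipPatterns, h1, h2, h3, e4, e5]
    cases PySem.Chars.startswith sw.toList ['-', 'b', 's'] <;> simp
  ·
    have e5 : PySem.Str.startswith i "-scc" = false :=
      pvPats_disjoint i "-bb" "-scc" (by decide) (by decide) (by decide) h4
    rw [List.filter_filter]
    apply List.filter_congr
    intro sw _
    simp at h1 h2 h3 h4 e5
    simp [pvPredAny, pvSzipPatterns, h1, h2, h3, h4, e5]
    cases PySem.Chars.startswith sw.toList ['-', 'b', 'b'] <;> simp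
  ·
    rw [List.filter_filter]
    apply List.filter_congr
    intro sw _
    simp at h1 h2 h3 h4 h5
    simp [pvPredAny, pvSzipPatterns, h1, h2, h3, h4, h5]
    cases PySem.Chars.startswith sw.toList ['-', 's', 'c', 'c'] <;> simp
  ·
    apply List.filter_congr
    intro sw _
    simp at h1 h2 h3 h4 h5
    simp [pvPredAny, pvSzipPatterns, h1, h2, h3, h4, h5]

lemma pvFoldl_eq (l c : List String) :
    l.foldl (fun c in_switch => pvSzipInner c in_switch pvSzipPatterns) c
      = c.filter (fun sw => !(pvPredAny l sw)) := by
  induction l generalizing c with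
  | nil => simp [pvPredAny, pvSzipPatterns]
  | cons i l ih => rw [List.foldl_cons, ih, pvStep_eq]

lemma pvAlt_filter (l : List String) (sw0 : String) :
    (pvSzipPatterns.filter (fun p => l.any (fun sw => PySem.Str.startswith sw p))).any
        (fun p => PySem.Str.startswith sw0 p)
      = pvPredAny l sw0 := by
  simp [pvPredAny, List.any_filter]

-- ===== VERDICT (by name: the statement is the Claim_ definition above) =====
theorem szip_switches_spec : Claim_equal_szip_switches := by
  intro in_switches _
  show _ = _
  simp only [szip_switches, szip_switches_alt, pvFoldl_eq]
  have hfun : (fun sw => !(pvPredAny in_switches sw))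
      = (fun sw => !((pvSzipPatterns.filter
            (fun p => in_switches.any (fun sw => PySem.Str.startswith sw p))).any
              (fun p => PySem.Str.startswith sw p))) := by
    funext sw
    rw [pvAlt_filter]
  rw [hfun]
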